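-- pv_equiv track=rewrite | github.com/seecr/meresco-components | merescocomponents/web/googlelikeparse.py | isGoogleLikeBooleanQuery
-- ===== SOURCE A (Python) =====
-- def isGoogleLikeBooleanQuery(aString):
--     googleLike = False
--     for part in aString.lower().split():
--         if part[0] in ['-', '+']:
--             googleLike = False
--             break
--         elif part in ['and', 'or', 'not']:
--             googleLike = True
--     return googleLike
-- ===== SOURCE B (Python) =====
-- def isGoogleLikeBooleanQuery(aString):
--     words = aString.lower().split()
--     if any(w[0] in '+-' for w in words):
--         return False
--     return any(w in ('and', 'or', 'not') for w in words)
-- ===== Notes on version B (the rewrite author's own statement) =====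
-- stated objective: simpler
-- what changed: Replaces the stateful flag-setting loop with break by two independent short-circuiting any() scans: a word beginning with a plus or minus sign forces False, otherwise the result is whether any word is an operator.
import Mathlib
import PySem

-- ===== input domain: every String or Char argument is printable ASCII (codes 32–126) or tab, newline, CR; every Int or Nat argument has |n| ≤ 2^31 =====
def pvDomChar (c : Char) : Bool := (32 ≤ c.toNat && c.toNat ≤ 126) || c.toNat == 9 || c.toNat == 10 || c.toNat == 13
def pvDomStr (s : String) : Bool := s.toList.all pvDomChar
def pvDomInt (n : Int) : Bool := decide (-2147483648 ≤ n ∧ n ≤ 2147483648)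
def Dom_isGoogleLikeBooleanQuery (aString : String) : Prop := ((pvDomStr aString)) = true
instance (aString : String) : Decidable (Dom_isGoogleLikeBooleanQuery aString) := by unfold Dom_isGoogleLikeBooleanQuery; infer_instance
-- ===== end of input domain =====

-- B replaces A's stateful flag-setting loop (with break) by two independent short-circuiting scans; objective: simpler.

-- ===== PORT A =====
-- the for-loop with the mutable flag `googleLike` and the break
def pvLoopA : List String → Bool → Bool
  | [], googleLike => googleLike
  | part :: rest, googleLike =>
    if PySem.Str.pyGet? part 0 == some '-' || PySem.Str.pyGet? part 0 == some '+' then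
      false  -- googleLike = False; break
    else if part == "and" || part == "or" || part == "not" then
      pvLoopA rest true
    else
      pvLoopA rest googleLike

def isGoogleLikeBooleanQuery (aString : String) : Bool :=
  pvLoopA (PySem.Str.split₀ (PySem.Str.lower aString)) false

-- ===== PORT B =====
def isGoogleLikeBooleanQuery_alt (aString : String) : Bool :=
  let words := PySem.Str.split₀ (PySem.Str.lower aString)
  if words.any (fun w => PySem.Str.pyGet? w 0 == some '-' || PySem.Str.pyGet? w 0 == some '+') then
    false
  else
    words.any (fun w => w == "and" || w == "or" || w == "not")

-- ===== PRECONDITION & SPEC =====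
def Spec_isGoogleLikeBooleanQuery (aString : String) (out : Bool) : Prop := out = isGoogleLikeBooleanQuery_alt aString
instance (aString : String) (out : Bool) : Decidable (Spec_isGoogleLikeBooleanQuery aString out) := by unfold Spec_isGoogleLikeBooleanQuery; infer_instance

-- ===== CLAIM (what is proved, stated in full; the proofs are below) =====
def Claim_equal_isGoogleLikeBooleanQuery : Prop := ∀ (aString : String), Dom_isGoogleLikeBooleanQuery aString → Spec_isGoogleLikeBooleanQuery aString (isGoogleLikeBooleanQuery aString)

-- ===== LEMMAS AND PROOFS =====
-- A's loop, characterised: a '+'/'-' word anywhere forces false; otherwise the flag ends up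
-- true iff it started true or some word is an operator.
theorem pvLoopA_eq (ws : List String) (g : Bool) :
    pvLoopA ws g =
      if ws.any (fun w => PySem.Str.pyGet? w 0 == some '-' || PySem.Str.pyGet? w 0 == some '+') then
        false
      else
        (g || ws.any (fun w => w == "and" || w == "or" || w == "not")) := by
  induction ws generalizing g with
  | nil => simp [pvLoopA]
  | cons p rest ih =>
    simp only [pvLoopA, List.any_cons]
    by_cases hA : PySem.List.pyGet? p.toList 0 = some '-'
    · simp [hA]
    · by_cases hB : PySem.List.pyGet? p.toList 0 = some '+'
      · simp [hB]
      · by_cases hop : p = "and"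
        · simp [hA, hB, hop, ih]
        · by_cases hop2 : p = "or"
          · simp [hA, hB, hop, hop2, ih]
          · by_cases hop3 : p = "not"
            · simp [beq_iff_eq, hA, hB, hop, hop2, hop3, ih]
            · have h1 : (p == "and") = false := beq_eq_false_iff_ne.mpr hop
              have h2 : (p == "or") = false := beq_eq_false_iff_ne.mpr hop2
              have h3 : (p == "not") = false := beq_eq_false_iff_ne.mpr hop3
              simp [hA, hB, h1, h2, h3, ih]

-- ===== VERDICT (by name: the statement is the Claim_ definition above) =====
theorem isGoogleLikeBooleanQuery_spec : Claim_equal_isGoogleLikeBooleanQuery := by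
  intro aString _
  unfold Spec_isGoogleLikeBooleanQuery isGoogleLikeBooleanQuery isGoogleLikeBooleanQuery_alt
  rw [pvLoopA_eq]
  simp
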